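-- pv_equiv track=rewrite | github.com/insightn777/algorithmStudy | boj_13305/solve.py | solve
-- ===== SOURCE A (Python) =====
-- def solve(cities: int, distance: str, price: str) -> str:
--     distance = [ int(i) for i in distance.split() ]
--     price = [ int(i) for i in price.split() ]
--     result = 0
--     cheapest_price = 1000000000
--     for i in range(cities - 1):
--         cheapest_price = price[i] if price[i] < cheapest_price else cheapest_price
--         result += distance[i] * cheapest_price
--     return str(result)
-- ===== SOURCE B (Python) =====
-- def solve(cities: int, distance: str, price: str) -> str:
--     d = [int(x) for x in distance.split()]
--     p = [int(x) for x in price.split()]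
--     n = cities - 1
--     total = 0
--     j = 0
--     while j < n:
--         # refuel at station j; drive until the next strictly cheaper station
--         k = j + 1
--         while k < n and p[k] >= p[j]:
--             k += 1
--         total += p[j] * sum(d[j:k])
--         j = k
--     return str(total)
-- ===== Notes on version B (the rewrite author's own statement) =====
-- stated objective: alternative
-- what changed: A accumulates cost leg by leg with a running-minimum price; B is the segment greedy: from each refuelling station it scans forward to the next strictly cheaper station and adds price * (total distance of that whole segment), so the outer loop runs over cheapest-station segments, not legs. Pre_ also excludes inputs with a negative distance token: road lengths are nonnegative in this task's domain.
-- intended difference: On inputs where some leg i < cities-1 has positive distance and every price p[0..i] exceeds 1000000000, A's arbitrary 1000000000 seed caps the fuel price and it returns the capped total, while B pays the true cheapest station price, which is the intended cost. — e.g. on solve(2, "1", "2000000000"): A returns "1000000000", B returns "2000000000"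
-- outside the precondition, e.g. on solve(2, '-1', '2000000000'): A returns '-1000000000', B returns '-2000000000'
import Mathlib
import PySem

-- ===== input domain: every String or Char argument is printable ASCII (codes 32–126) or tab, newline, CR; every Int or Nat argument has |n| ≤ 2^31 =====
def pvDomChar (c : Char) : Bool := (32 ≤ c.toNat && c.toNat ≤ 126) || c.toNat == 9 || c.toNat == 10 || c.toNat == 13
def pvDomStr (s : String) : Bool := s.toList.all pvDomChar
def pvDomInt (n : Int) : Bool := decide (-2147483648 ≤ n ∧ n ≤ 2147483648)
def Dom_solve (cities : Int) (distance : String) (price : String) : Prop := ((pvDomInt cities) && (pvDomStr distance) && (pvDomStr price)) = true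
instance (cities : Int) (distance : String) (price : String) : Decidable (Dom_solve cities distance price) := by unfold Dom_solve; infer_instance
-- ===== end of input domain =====

-- B replaces A's per-leg running-minimum accumulation by the segment greedy: jump from each
-- refuelling station to the next strictly cheaper one and pay price * whole-segment distance.

-- ===== PORT A =====
-- shared parsing helper: [int(x) for x in s.split()]; the getD 0 fallback is unreachable under Pre_solve
def pvParse (s : String) : List Int :=
  (PySem.Str.split₀ s).map (fun t => (PySem.Int.ofStr? t).getD 0)

def solve (cities : Int) (distance : String) (price : String) : String :=
  let d := pvParse distance
  let p := pvParse price
  let st := (PySem.List.pyRange 0 (cities - 1) 1).foldl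
    (fun (st : Int × Int) i =>
      -- cheapest_price = price[i] if price[i] < cheapest_price else cheapest_price; result += distance[i] * cheapest_price
      let c := if PySem.List.pyGetD p i 0 < st.2 then PySem.List.pyGetD p i 0 else st.2
      (st.1 + PySem.List.pyGetD d i 0 * c, c))
    (0, 1000000000)
  PySem.Int.toStr st.1

-- ===== PORT B =====
-- inner while: k = j+1; while k < n and p[k] >= p[j]: k += 1   (fuel = a totalization guard only)
def pvNextK (p : List Int) (n pj : Int) : Int → Nat → Int
  | k, 0 => k
  | k, fuel + 1 =>
    if k < n ∧ pj ≤ PySem.List.pyGetD p k 0 then pvNextK p n pj (k + 1) fuel else k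

-- outer while: while j < n: … total += p[j] * sum(d[j:k]); j = k
def pvGoB (d p : List Int) (n : Int) : Int → Nat → Int
  | _, 0 => 0
  | j, fuel + 1 =>
    if j < n then
      let k := pvNextK p n (PySem.List.pyGetD p j 0) (j + 1) fuel
      PySem.List.pyGetD p j 0 * (PySem.List.slice d (some j) (some k)).sum + pvGoB d p n k fuel
    else 0

def solve_alt (cities : Int) (distance : String) (price : String) : String :=
  let d := pvParse distance
  let p := pvParse price
  let n := cities - 1
  PySem.Int.toStr (pvGoB d p n 0 n.toNat)

-- ===== PRECONDITION & SPEC =====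
-- Pre_ excludes the inputs where A raises (a token int() rejects: ValueError; fewer than cities-1
-- tokens in distance/price: IndexError), and inputs with a negative distance token: road lengths are
-- nonnegative in this task's domain, and on such inputs the change region below would not be one-sided.
def Pre_solve (cities : Int) (distance : String) (price : String) : Prop :=
  (∀ s ∈ PySem.Str.split₀ distance, (PySem.Int.ofStr? s).isSome = true) ∧
  (∀ s ∈ PySem.Str.split₀ price, (PySem.Int.ofStr? s).isSome = true) ∧
  (∀ x ∈ pvParse distance, 0 ≤ x) ∧
  cities - 1 ≤ ((PySem.Str.split₀ distance).length : Int) ∧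
  cities - 1 ≤ ((PySem.Str.split₀ price).length : Int)
instance (cities : Int) (distance : String) (price : String) : Decidable (Pre_solve cities distance price) := by unfold Pre_solve; infer_instance

def pvWitness_solve : Int × String × String := (3, "2 3", "5 2 4")

-- On inputs where some leg i < cities-1 has positive distance and every price p[0..i] exceeds
-- 1000000000, A's arbitrary seed caps the fuel price at 1000000000 and it returns the capped total,
-- while B pays the true cheapest station price, which is the intended cost.
def D_solve (cities : Int) (distance : String) (price : String) : Prop :=
  ∃ i < min (cities - 1).toNat (pvParse distance).length,
    0 < (pvParse distance).getD i 0 ∧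
    ∀ j ≤ i, 1000000000 < (pvParse price).getD j 0
instance (cities : Int) (distance : String) (price : String) : Decidable (D_solve cities distance price) := by unfold D_solve; infer_instance

def Spec_solve (cities : Int) (distance : String) (price : String) (out : String) : Prop := ¬ D_solve cities distance price → out = solve_alt cities distance price
instance (cities : Int) (distance : String) (price : String) (out : String) : Decidable (Spec_solve cities distance price out) := by unfold Spec_solve; infer_instance

def pvDiffWitness_solve : Int × String × String := (2, "1", "2000000000")
def pvDiffWitnessOut_solve : String × String := ("1000000000", "2000000000")

-- ===== CLAIM (what is proved, stated in full; the proofs are below) =====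
def Claim_unchanged_solve : Prop := ∀ (cities : Int) (distance : String) (price : String), Dom_solve cities distance price → Pre_solve cities distance price → Spec_solve cities distance price (solve cities distance price)
def Claim_changed_solve : Prop := Dom_solve (pvDiffWitness_solve.1) (pvDiffWitness_solve.2.1) (pvDiffWitness_solve.2.2) ∧ Pre_solve (pvDiffWitness_solve.1) (pvDiffWitness_solve.2.1) (pvDiffWitness_solve.2.2) ∧ D_solve (pvDiffWitness_solve.1) (pvDiffWitness_solve.2.1) (pvDiffWitness_solve.2.2) ∧ solve (pvDiffWitness_solve.1) (pvDiffWitness_solve.2.1) (pvDiffWitness_solve.2.2) = pvDiffWitnessOut_solve.1 ∧ solve_alt (pvDiffWitness_solve.1) (pvDiffWitness_solve.2.1) (pvDiffWitness_solve.2.2) = pvDiffWitnessOut_solve.2 ∧ pvDiffWitnessOut_solve.1 ≠ pvDiffWitnessOut_solve.2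

def Claim_exact_solve : Prop := ∀ (cities : Int) (distance : String) (price : String), Dom_solve cities distance price → Pre_solve cities distance price → D_solve cities distance price → solve cities distance price ≠ solve_alt cities distance price

-- ===== LEMMAS AND PROOFS =====

-- min of p[t..t+g] (via getD), peeled from the left
def msAux (p : List Int) : Nat → Nat → Int
  | 0, t => p.getD t 0
  | g + 1, t => min (p.getD t 0) (msAux p g (t + 1))



lemma msAux_succ_right (p : List Int) (g t : Nat) :
    msAux p (g + 1) t = min (msAux p g t) (p.getD (t + g + 1) 0) := by
  induction g generalizing t with
  | zero => simp [msAux]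
  | succ g ih =>
    show min (p.getD t 0) (msAux p (g + 1) (t + 1)) = _
    rw [ih]
    show _ = min (min (p.getD t 0) (msAux p g (t + 1))) (p.getD (t + (g + 1) + 1) 0)
    rw [min_assoc]
    ring_nf

lemma msAux_split (p : List Int) (g1 g2 t : Nat) :
    msAux p (g1 + g2 + 1) t = min (msAux p g1 t) (msAux p g2 (t + g1 + 1)) := by
  induction g1 generalizing t with
  | zero => simp [msAux]
  | succ g1 ih =>
    rw [show g1 + 1 + g2 + 1 = (g1 + g2 + 1) + 1 from by ring]
    show min (p.getD t 0) (msAux p (g1 + g2 + 1) (t + 1)) = _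
    rw [ih]
    show _ = min (min (p.getD t 0) (msAux p g1 (t + 1))) (msAux p g2 (t + (g1 + 1) + 1))
    rw [min_assoc]
    ring_nf

lemma msAux_le_seed (p : List Int) (g t : Nat) : msAux p g t ≤ p.getD t 0 := by
  cases g with
  | zero => simp [msAux]
  | succ g => exact min_le_left _ _

lemma le_msAux (p : List Int) (g t : Nat) (c : Int)
    (h : ∀ u, t ≤ u → u ≤ t + g → c ≤ p.getD u 0) : c ≤ msAux p g t := by
  induction g generalizing t with
  | zero => exact h t le_rfl (by omega)
  | succ g ih =>
    refine le_min (h t le_rfl (by omega)) (ih (t + 1) (fun u hu1 hu2 => h u (by omega) (by omega)))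

lemma msAux_le_mem (p : List Int) (g t u : Nat) (h1 : t ≤ u) (h2 : u ≤ t + g) :
    msAux p g t ≤ p.getD u 0 := by
  induction g generalizing t with
  | zero =>
    have h : u = t := by omega
    subst h
    simp [msAux]
  | succ g ih =>
    rcases Nat.eq_or_lt_of_le h1 with h | h
    · rw [← h]; exact msAux_le_seed p _ t
    · exact le_trans (min_le_right _ _) (ih (t + 1) (by omega) (by omega))

lemma msAux_const (p : List Int) (g t : Nat)
    (h : ∀ u, t ≤ u → u ≤ t + g → p.getD t 0 ≤ p.getD u 0) : msAux p g t = p.getD t 0 :=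
  le_antisymm (msAux_le_seed p g t) (le_msAux p g t _ h)

-- A's loop body, named
def pvStepA (d p : List Int) (st : Int × Int) (i : Int) : Int × Int :=
  let c := if PySem.List.pyGetD p i 0 < st.2 then PySem.List.pyGetD p i 0 else st.2
  (st.1 + PySem.List.pyGetD d i 0 * c, c)

def pvCmin (p : List Int) (C : Int) : Nat → Int
  | 0 => C
  | k + 1 => min C (msAux p k 0)

-- A's fold computes the per-leg sum with seeded prefix minima
lemma loopA_eq (d p : List Int) (C : Int) (k : Nat) :
    (PySem.List.pyRange 0 (k : Int) 1).foldl (pvStepA d p) (0, C)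
      = (∑ i ∈ Finset.range k, d.getD i 0 * min C (msAux p i 0), pvCmin p C k) := by
  induction k with
  | zero => simp [PySem.List.pyRange_one_eq_nil, pvCmin]
  | succ k ih =>
    have hrange : PySem.List.pyRange 0 ((k + 1 : Nat) : Int) 1
        = PySem.List.pyRange 0 (k : Int) 1 ++ [(k : Int)] := by
      push_cast
      exact PySem.List.pyRange_one_succ_right (by positivity)
    rw [hrange, List.foldl_append, ih]
    simp only [List.foldl_cons, List.foldl_nil, pvStepA, PySem.List.pyGetD_natCast]
    have hmin : (if p.getD k 0 < pvCmin p C k then p.getD k 0 else pvCmin p C k)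
        = pvCmin p C (k + 1) := by
      cases k with
      | zero => simp [pvCmin, msAux, min_def]; split_ifs <;> omega
      | succ k =>
        simp only [pvCmin, msAux_succ_right p k 0, Nat.zero_add]
        rw [min_def, ← min_assoc]
        split_ifs <;> omega
    rw [hmin, Finset.sum_range_succ]
    simp [pvCmin]

-- sum of a slice as a Finset sum of getD values (extra out-of-range terms are 0)
lemma slice_sum_eq (l : List Int) (j m : Nat) :
    ((l.drop j).take m).sum = ∑ i ∈ Finset.Ico j (j + m), l.getD i 0 := by
  induction l generalizing j m with
  | nil =>
    simp [List.getD]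
  | cons a l ih =>
    cases j with
    | zero =>
      cases m with
      | zero => simp
      | succ m =>
        simp only [List.drop_zero, List.take_succ_cons, List.sum_cons]
        have ihm := ih 0 m
        simp only [List.drop_zero] at ihm
        rw [ihm]
        simp only [Nat.zero_add, ← Finset.range_eq_Ico]
        rw [Finset.sum_range_succ']
        simp only [List.getD_cons_succ, List.getD_cons_zero]
        ring
    | succ j =>
      simp only [List.drop_succ_cons]
      rw [ih j m]
      have hsh : ∑ i ∈ Finset.Ico (j + 1) (j + 1 + m), (a :: l).getD i 0
          = ∑ i ∈ Finset.Ico j (j + m), (a :: l).getD (i + 1) 0 := by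
        rw [Finset.sum_Ico_eq_sum_range, Finset.sum_Ico_eq_sum_range,
          show j + 1 + m - (j + 1) = m from by omega, show j + m - j = m from by omega]
        exact Finset.sum_congr rfl (fun i _ => by
          rw [show j + 1 + i = j + i + 1 from by ring])
      rw [hsh]
      exact Finset.sum_congr rfl (fun i _ => by simp [List.getD])

-- the inner while loop finds the first index ≥ j+1 failing (k < n ∧ p[j] ≤ p[k])
lemma nextK_spec (p : List Int) (n pj : Int) (k : Nat) (fuel : Nat)
    (hfuel : n.toNat - k ≤ fuel) :
    ∃ K : Nat, pvNextK p n pj (k : Int) fuel = (K : Int) ∧ k ≤ K ∧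
      (∀ t, k ≤ t → t < K → (t : Int) < n ∧ pj ≤ p.getD t 0) ∧
      ¬ ((K : Int) < n ∧ pj ≤ p.getD K 0) := by
  induction fuel generalizing k with
  | zero =>
    refine ⟨k, rfl, le_rfl, fun t h1 h2 => absurd (lt_of_le_of_lt h1 h2) (lt_irrefl _), ?_⟩
    rintro ⟨h1, _⟩; omega
  | succ fuel ih =>
    by_cases hc : (k : Int) < n ∧ pj ≤ PySem.List.pyGetD p (k : Int) 0
    · have hstep : pvNextK p n pj (k : Int) (fuel + 1) = pvNextK p n pj ((k + 1 : Nat) : Int) fuel := by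
        show (if (k : Int) < n ∧ pj ≤ PySem.List.pyGetD p (k : Int) 0 then _ else _) = _
        rw [if_pos hc]; push_cast; ring_nf
      obtain ⟨K, hK, hle, hmid, hstop⟩ := ih (k + 1) (by omega)
      rw [PySem.List.pyGetD_natCast] at hc
      refine ⟨K, hstep.trans hK, by omega, fun t h1 h2 => ?_, hstop⟩
      rcases Nat.eq_or_lt_of_le h1 with h | h
      · subst h; exact hc
      · exact hmid t (by omega) h2
    · refine ⟨k, ?_, le_rfl, fun t h1 h2 => absurd (lt_of_le_of_lt h1 h2) (lt_irrefl _), ?_⟩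
      · show (if (k : Int) < n ∧ pj ≤ PySem.List.pyGetD p (k : Int) 0 then _ else _) = _
        rw [if_neg hc]
      · rw [PySem.List.pyGetD_natCast] at hc; exact hc

-- B's outer loop computes the per-leg sum with true segment minima
lemma goB_eq (d p : List Int) (n : Int) (j : Nat) (fuel : Nat)
    (hfuel : n.toNat - j ≤ fuel) :
    pvGoB d p n (j : Int) fuel = ∑ i ∈ Finset.Ico j n.toNat, d.getD i 0 * msAux p (i - j) j := by
  induction fuel generalizing j with
  | zero =>
    have : Finset.Ico j n.toNat = ∅ := by
      apply Finset.Ico_eq_empty; omega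
    simp [pvGoB, this]
  | succ fuel ih =>
    by_cases hj : (j : Int) < n
    · have hjN : j < n.toNat := by omega
      obtain ⟨K, hK, hle, hmid, hstop⟩ := nextK_spec p n (PySem.List.pyGetD p (j : Int) 0) (j + 1) fuel (by omega)
      have hKle : K ≤ n.toNat := by
        rcases Nat.eq_or_lt_of_le hle with h | h
        · omega
        · have := (hmid (K - 1) (by omega) (by omega)).1; omega
      have hstep : pvGoB d p n (j : Int) (fuel + 1)
          = PySem.List.pyGetD p (j : Int) 0 * (PySem.List.slice d (some (j : Int)) (some (K : Int))).sum
            + pvGoB d p n (K : Int) fuel := by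
        show (if (j : Int) < n then _ else _) = _
        rw [if_pos hj]
        have : ((j : Int) + 1) = ((j + 1 : Nat) : Int) := by push_cast; ring
        rw [this, hK]
      rw [hstep, ih K (by omega), PySem.List.pyGetD_natCast,
        PySem.List.slice_natCast, slice_sum_eq d j (K - j),
        show j + (K - j) = K from by omega]
      rw [← Finset.sum_Ico_consecutive _ (le_of_lt (by omega : j < K)) hKle]
      congr 1
      · -- segment [j, K): the minimum is p[j] everywhere
        rw [Finset.mul_sum]
        refine Finset.sum_congr rfl (fun i hi => ?_)
        obtain ⟨hi1, hi2⟩ := Finset.mem_Ico.mp hi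
        have : msAux p (i - j) j = p.getD j 0 := by
          apply msAux_const
          intro u hu1 hu2
          rcases Nat.eq_or_lt_of_le hu1 with h | h
          · subst h; rfl
          · rw [PySem.List.pyGetD_natCast] at hmid
            exact (hmid u (by omega) (by omega)).2
        rw [this]; ring
      · -- tail [K, n): the anchor can move from j to K
        refine Finset.sum_congr rfl (fun i hi => ?_)
        obtain ⟨hi1, hi2⟩ := Finset.mem_Ico.mp hi
        have hKlt : (K : Int) < n := by omega
        rw [PySem.List.pyGetD_natCast] at hstop
        have hpK : p.getD K 0 < p.getD j 0 := by
          by_contra h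
          exact hstop ⟨hKlt, by omega⟩
        congr 1
        -- msAux p (i - j) j = msAux p (i - K) K
        have hsplit : i - j = (K - 1 - j) + (i - K) + 1 := by omega
        rw [hsplit, msAux_split]
        have hleft : msAux p (K - 1 - j) j = p.getD j 0 := by
          apply msAux_const
          intro u hu1 hu2
          rcases Nat.eq_or_lt_of_le hu1 with h | h
          · subst h; rfl
          · rw [PySem.List.pyGetD_natCast] at hmid
            exact (hmid u (by omega) (by omega)).2
        have hanchor : j + (K - 1 - j) + 1 = K := by omega
        rw [hleft, hanchor, min_eq_right]
        exact le_trans (msAux_le_seed p _ K) (le_of_lt hpK)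
    · have : Finset.Ico j n.toNat = ∅ := by
        apply Finset.Ico_eq_empty; omega
      show (if (j : Int) < n then _ else _) = _
      rw [if_neg hj]
      simp [this]

-- ===== str(n) is injective =====
lemma pvToDigitsCore_eq : ∀ (f n : Nat) (acc : List Char), n ≠ 0 → n ≤ f →
    Nat.toDigitsCore 10 f n acc = ((Nat.digits 10 n).map Nat.digitChar).reverse ++ acc := by
  intro f
  induction f with
  | zero => intro n acc h1 h2; omega
  | succ f ih =>
    intro n acc h1 h2
    by_cases hdiv : n / 10 = 0
    · have hn : n < 10 := by omega
      have hcore : Nat.toDigitsCore 10 (f + 1) n acc = Nat.digitChar (n % 10) :: acc := by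
        simp [Nat.toDigitsCore, hdiv]
      rw [hcore, Nat.digits_def' (by norm_num : (1 : Nat) < 10) (by omega), hdiv]
      simp
    · have hstep : Nat.toDigitsCore 10 (f + 1) n acc
          = Nat.toDigitsCore 10 f (n / 10) (Nat.digitChar (n % 10) :: acc) := by
        simp [Nat.toDigitsCore, hdiv]
      have hfuel : n / 10 ≤ f := by
        have := Nat.div_lt_self (by omega : 0 < n) (by norm_num : (1 : Nat) < 10)
        omega
      rw [hstep, ih (n / 10) _ hdiv hfuel,
        Nat.digits_def' (by norm_num : (1 : Nat) < 10) (by omega : 0 < n)]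
      simp

lemma pvToDigits_eq (n : Nat) (h : n ≠ 0) :
    Nat.toDigits 10 n = ((Nat.digits 10 n).map Nat.digitChar).reverse := by
  unfold Nat.toDigits
  rw [pvToDigitsCore_eq (n + 1) n [] h (by omega)]
  simp

lemma pvDigitChar_inj : ∀ a < 10, ∀ b < 10, Nat.digitChar a = Nat.digitChar b → a = b := by decide

lemma pvMapDigitChar_inj : ∀ (l1 l2 : List Nat), (∀ x ∈ l1, x < 10) → (∀ x ∈ l2, x < 10) →
    l1.map Nat.digitChar = l2.map Nat.digitChar → l1 = l2 := by
  intro l1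
  induction l1 with
  | nil => intro l2 _ _ h; cases l2 <;> simp_all
  | cons a l1 ih =>
    intro l2 h1 h2 h
    cases l2 with
    | nil => simp_all
    | cons b l2 =>
      simp only [List.map_cons, List.cons.injEq] at h
      have hab := pvDigitChar_inj a (h1 a (by simp)) b (h2 b (by simp)) h.1
      rw [hab, ih l2 (fun x hx => h1 x (by simp [hx])) (fun x hx => h2 x (by simp [hx])) h.2]

lemma pvDash_not_mem (n : Nat) : '-' ∉ Nat.toDigits 10 n := by
  by_cases h : n = 0
  · subst h; decide
  · rw [pvToDigits_eq n h]
    intro hmem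
    rw [List.mem_reverse] at hmem
    obtain ⟨x, hx, hchar⟩ := List.mem_map.mp hmem
    have hlt : x < 10 := Nat.digits_lt_base (by norm_num) hx
    have : ∀ y < 10, Nat.digitChar y ≠ '-' := by decide
    exact this x hlt hchar

lemma pvToDigits_inj (a b : Nat) (h : Nat.toDigits 10 a = Nat.toDigits 10 b) : a = b := by
  by_cases ha : a = 0 <;> by_cases hb : b = 0
  · omega
  · exfalso
    rw [show Nat.toDigits 10 a = ['0'] from by rw [ha]; decide, pvToDigits_eq b hb] at h
    have : Nat.digits 10 b = [0] := by
      apply pvMapDigitChar_inj _ _ (fun x hx => Nat.digits_lt_base (by norm_num) hx)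
        (by intro x hx; simp at hx; omega)
      have := (List.reverse_inj).mpr h.symm
      simpa using h.symm
    have hofd := Nat.ofDigits_digits 10 b
    rw [this] at hofd
    simp [Nat.ofDigits] at hofd
    omega
  · exfalso
    rw [show Nat.toDigits 10 b = ['0'] from by rw [hb]; decide, pvToDigits_eq a ha] at h
    have : Nat.digits 10 a = [0] := by
      apply pvMapDigitChar_inj _ _ (fun x hx => Nat.digits_lt_base (by norm_num) hx)
        (by intro x hx; simp at hx; omega)
      simpa using h
    have hofd := Nat.ofDigits_digits 10 a
    rw [this] at hofd
    simp [Nat.ofDigits] at hofd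
    omega
  · rw [pvToDigits_eq a ha, pvToDigits_eq b hb, List.reverse_inj] at h
    have hd := pvMapDigitChar_inj _ _ (fun x hx => Nat.digits_lt_base (by norm_num) hx)
      (fun x hx => Nat.digits_lt_base (by norm_num) hx) h
    have h1 := Nat.ofDigits_digits 10 a
    have h2 := Nat.ofDigits_digits 10 b
    rw [hd, h2] at h1
    exact h1.symm

lemma pvToStr_inj (a b : Int) (h : PySem.Int.toStr a = PySem.Int.toStr b) : a = b := by
  have hl := congrArg String.toList h
  rw [PySem.Int.toList_toStr, PySem.Int.toList_toStr] at hl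
  unfold PySem.Int.toChars at hl
  split_ifs at hl with h1 h2 h2
  · simp only [List.cons.injEq] at hl
    have := pvToDigits_inj _ _ hl.2
    omega
  · exfalso
    exact pvDash_not_mem b.toNat (hl ▸ List.mem_cons_self)
  · exfalso
    exact pvDash_not_mem a.toNat (hl ▸ List.mem_cons_self)
  · have := pvToDigits_inj _ _ hl
    omega

-- ===== both ports as closed sums over the same legs =====
lemma pvSolve_eq (cities : Int) (distance price : String) :
    solve cities distance price
      = PySem.Int.toStr (∑ i ∈ Finset.range (cities - 1).toNat,
          (pvParse distance).getD i 0 * min 1000000000 (msAux (pvParse price) i 0)) := by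
  unfold solve
  set d := pvParse distance with hd
  set p := pvParse price with hp
  set N := (cities - 1).toNat with hN
  have hrange : PySem.List.pyRange 0 (cities - 1) 1 = PySem.List.pyRange 0 (N : Int) 1 := by
    rcases (by omega : ((N : Int) = cities - 1) ∨ (cities - 1 ≤ 0 ∧ N = 0)) with h | ⟨h1, h2⟩
    · rw [h]
    · rw [h2, PySem.List.pyRange_one_eq_nil h1]
      simp [PySem.List.pyRange_one_eq_nil]
  have hA := loopA_eq d p 1000000000 N
  rw [hrange]
  show PySem.Int.toStr ((PySem.List.pyRange 0 (N : Int) 1).foldl (pvStepA d p) (0, 1000000000)).1 = _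
  rw [hA]

lemma pvSolveAlt_eq (cities : Int) (distance price : String) :
    solve_alt cities distance price
      = PySem.Int.toStr (∑ i ∈ Finset.range (cities - 1).toNat,
          (pvParse distance).getD i 0 * msAux (pvParse price) i 0) := by
  unfold solve_alt
  set d := pvParse distance with hd
  set p := pvParse price with hp
  set N := (cities - 1).toNat with hN
  have hB := goB_eq d p (cities - 1) 0 ((cities - 1).toNat) (by omega)
  rw [← hN] at hB
  show PySem.Int.toStr (pvGoB d p (cities - 1) ((0 : Nat) : Int) N) = _
  rw [hB]
  congr 1
  rw [Finset.range_eq_Ico]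
  apply Finset.sum_congr rfl
  intro i _
  rw [Nat.sub_zero]

-- B's total minus A's total is exactly the sentinel-correction sum (msAux form)
lemma pvKey (cities : Int) (distance price : String) :
    (∑ i ∈ Finset.range (cities - 1).toNat,
        (pvParse distance).getD i 0 * msAux (pvParse price) i 0)
      - (∑ i ∈ Finset.range (cities - 1).toNat,
        (pvParse distance).getD i 0 * min 1000000000 (msAux (pvParse price) i 0))
      = ∑ i ∈ Finset.range (cities - 1).toNat,
        (pvParse distance).getD i 0 *
          (msAux (pvParse price) i 0 - min 1000000000 (msAux (pvParse price) i 0)) := by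
  rw [← Finset.sum_sub_distrib]
  exact Finset.sum_congr rfl (fun i _ => by ring)

theorem solve_spec : Claim_unchanged_solve := by
  intro cities distance price _ hpre hnD
  obtain ⟨_, _, hdpos, _, _⟩ := hpre
  have hcorr : (∑ i ∈ Finset.range (cities - 1).toNat,
      (pvParse distance).getD i 0 *
        (msAux (pvParse price) i 0 - min 1000000000 (msAux (pvParse price) i 0))) = 0 := by
    apply Finset.sum_eq_zero
    intro i hi
    by_cases hil : i < (pvParse distance).length
    · by_cases hz : (pvParse distance).getD i 0 = 0
      · rw [hz]; ring
      · have hmem : (pvParse distance).getD i 0 ∈ pvParse distance := by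
          rw [List.getD_eq_getElem _ _ hil]
          exact List.getElem_mem _
        have hpos : 0 < (pvParse distance).getD i 0 := by
          have := hdpos _ hmem; omega
        have hj : ∃ j ≤ i, (pvParse price).getD j 0 ≤ 1000000000 := by
          by_contra hall
          push Not at hall
          exact hnD ⟨i, by
            have := Finset.mem_range.mp hi
            omega, hpos, fun j hji => hall j hji⟩
        obtain ⟨j, hj1, hj2⟩ := hj
        have hms : msAux (pvParse price) i 0 ≤ 1000000000 :=
          le_trans (msAux_le_mem (pvParse price) i 0 j (by omega) (by omega)) hj2
        have hmin : min 1000000000 (msAux (pvParse price) i 0) = msAux (pvParse price) i 0 := by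
          omega
        rw [hmin]; ring
    · rw [List.getD_eq_default _ _ (by omega)]; ring
  have hkey := pvKey cities distance price
  rw [pvSolve_eq, pvSolveAlt_eq]
  congr 1
  rw [hcorr] at hkey
  linarith

theorem solve_changed : Claim_changed_solve := by unfold Claim_changed_solve; decide

theorem solve_tight : Claim_exact_solve := by
  intro cities distance price _ hpre hD heq
  obtain ⟨_, _, hdpos, _, _⟩ := hpre
  obtain ⟨i0, hi0, hdi, hall⟩ := hD
  rw [pvSolve_eq, pvSolveAlt_eq] at heq
  have hsums := pvToStr_inj _ _ heq
  have hkey := pvKey cities distance price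
  have hpos : 0 < ∑ i ∈ Finset.range (cities - 1).toNat,
      (pvParse distance).getD i 0 *
        (msAux (pvParse price) i 0 - min 1000000000 (msAux (pvParse price) i 0)) := by
    apply Finset.sum_pos'
    · intro i _
      by_cases hil : i < (pvParse distance).length
      · have hmem : (pvParse distance).getD i 0 ∈ pvParse distance := by
          rw [List.getD_eq_getElem _ _ hil]
          exact List.getElem_mem _
        exact mul_nonneg (hdpos _ hmem) (by omega)
      · rw [List.getD_eq_default _ _ (by omega)]; simp
    · refine ⟨i0, Finset.mem_range.mpr (by omega), ?_⟩
      have hms : (1000000001 : Int) ≤ msAux (pvParse price) i0 0 := by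
        apply le_msAux
        intro u _ hu2
        have := hall u (by omega)
        omega
      exact mul_pos hdi (by omega)
  rw [← hsums] at hkey
  simp only [sub_self] at hkey
  linarith
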